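-- pv_equiv track=rewrite | github.com/Atjowt/elliotsr-functional | rational.py | dfs
-- ===== SOURCE A (Python) =====
-- def dfs(n):
--     if n == 1:
--         # root node; label = 1/1
--         return (1, 1)
--     if n % 2 == 0:
--         # left child; parent = n / 2
--         p, q = dfs(n // 2)
--         return (p, p + q)
--     else:
--         # right child; parent = (n - 1) / 2
--         p, q = dfs((n - 1) // 2)
--         return (p + q, q)
-- ===== SOURCE B (Python) =====
-- def dfs(n):
--     # Iterative: read n's binary digits below the leading 1 MSB->LSB,
--     # folding the Calkin-Wilf left/right-child steps over (p, q) = (1, 1).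
--     bits = []
--     m = n
--     while m > 1:
--         bits.append(m % 2)
--         m //= 2
--     p, q = 1, 1
--     for bit in reversed(bits):
--         if bit == 0:
--             p, q = p, p + q
--         else:
--             p, q = p + q, q
--     return (p, q)
-- ===== Notes on version B (the rewrite author's own statement) =====
-- stated objective: alternative
-- what changed: Replaced A's post-order recursion down to the root by an explicit iteration: collect n's binary digits once, then fold the left/right-child steps MSB-to-LSB over an accumulator (p,q)=(1,1), so no call stack is unwound.
-- outside the precondition, e.g. on dfs(0): A raises RecursionError, B returns (1, 1)
import Mathlib
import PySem

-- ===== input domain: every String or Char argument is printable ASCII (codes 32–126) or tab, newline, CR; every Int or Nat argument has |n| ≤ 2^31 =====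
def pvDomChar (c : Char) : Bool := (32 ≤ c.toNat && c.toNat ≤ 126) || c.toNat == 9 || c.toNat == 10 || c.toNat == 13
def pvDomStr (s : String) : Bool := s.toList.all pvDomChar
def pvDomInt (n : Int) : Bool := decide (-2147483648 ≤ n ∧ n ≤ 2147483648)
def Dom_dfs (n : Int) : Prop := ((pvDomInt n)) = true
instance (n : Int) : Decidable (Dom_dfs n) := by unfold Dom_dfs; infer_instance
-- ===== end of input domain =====

-- B replaces A's post-order recursion by an explicit bit-list + MSB-to-LSB fold over (p,q); same cost, iterative decomposition.


-- ===== PORT A =====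
-- Literal port of A; the 'n ≤ 0' guard only makes the recursion total (Python recurses
-- forever there, RecursionError — those inputs are outside Pre_dfs).
def dfs (n : Int) : Int × Int :=
  if n ≤ 0 then (0, 0)
  else if n = 1 then (1, 1)
  else if PySem.Int.mod n 2 = 0 then
    let pq := dfs (PySem.Int.floordiv n 2)
    (pq.1, pq.1 + pq.2)
  else
    let pq := dfs (PySem.Int.floordiv (n - 1) 2)
    (pq.1 + pq.2, pq.2)
termination_by n.toNat
decreasing_by
  · rw [PySem.Int.floordiv_eq_ediv_of_pos (by omega : (0:Int) < 2)]; omega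
  · rw [PySem.Int.floordiv_eq_ediv_of_pos (by omega : (0:Int) < 2)]; omega

-- ===== PORT B =====
-- the while loop of Source B: bits of n above the leading 1, LSB first
def dfsBits (n : Int) : List Int :=
  if 1 < n then PySem.Int.mod n 2 :: dfsBits (PySem.Int.floordiv n 2) else []
termination_by n.toNat
decreasing_by
  rw [PySem.Int.floordiv_eq_ediv_of_pos (by omega : (0:Int) < 2)]; omega

-- the body of Source B's for loop
def cwStep (pq : Int × Int) (bit : Int) : Int × Int :=
  if bit = 0 then (pq.1, pq.1 + pq.2) else (pq.1 + pq.2, pq.2)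

def dfs_alt (n : Int) : Int × Int := (dfsBits n).reverse.foldl cwStep (1, 1)

-- ===== PRECONDITION & SPEC =====
-- Pre_ excludes n ≤ 0, where Python A recurses forever and dies with RecursionError.
def Pre_dfs (n : Int) : Prop := 1 ≤ n
instance (n : Int) : Decidable (Pre_dfs n) := by unfold Pre_dfs; infer_instance
def pvWitness_dfs : Int := (6)
def Spec_dfs (n : Int) (out : Int × Int) : Prop := out = dfs_alt n
instance (n : Int) (out : Int × Int) : Decidable (Spec_dfs n out) := by unfold Spec_dfs; infer_instance

-- ===== CLAIM (what is proved, stated in full; the proofs are below) =====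
def Claim_equal_dfs : Prop := ∀ (n : Int), Dom_dfs n → Pre_dfs n → Spec_dfs n (dfs n)

-- ===== LEMMAS AND PROOFS =====
lemma dfs_alt_step (n : Int) (h : 1 < n) :
    dfs_alt n = cwStep (dfs_alt (PySem.Int.floordiv n 2)) (PySem.Int.mod n 2) := by
  unfold dfs_alt
  rw [dfsBits, if_pos h, List.reverse_cons, List.foldl_append]
  rfl

lemma dfs_eq_alt_aux : ∀ (k : Nat) (n : Int), n.toNat ≤ k → 1 ≤ n → dfs n = dfs_alt n := by
  intro k
  induction k with
  | zero => intro n hk h; omega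
  | succ k ih =>
    intro n hk h
    by_cases h1 : n = 1
    · subst h1
      rw [dfs]; unfold dfs_alt; rw [dfsBits]; norm_num
    · have h2 : 1 < n := by omega
      have hm : PySem.Int.mod n 2 = n % 2 :=
        PySem.Int.mod_eq_emod_of_pos (by omega : (0:Int) < 2)
      have hf : PySem.Int.floordiv n 2 = n / 2 :=
        PySem.Int.floordiv_eq_ediv_of_pos (by omega : (0:Int) < 2)
      have hrec : (n / 2).toNat ≤ k := by omega
      have hpos : 1 ≤ n / 2 := by omega
      rw [dfs, if_neg (by omega), if_neg h1, dfs_alt_step n h2]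
      by_cases he : n % 2 = 0
      · rw [if_pos (by rw [hm]; exact he)]
        rw [hf, ih _ hrec hpos]
        simp [cwStep, he]
      · have ho : n % 2 = 1 := by omega
        rw [if_neg (by rw [hm]; omega)]
        have hf' : PySem.Int.floordiv (n - 1) 2 = n / 2 := by
          rw [PySem.Int.floordiv_eq_ediv_of_pos (by omega : (0:Int) < 2)]; omega
        rw [hf', ih _ hrec hpos]
        simp [cwStep, ho]

-- ===== VERDICT (by name: the statement is the Claim_ definition above) =====
theorem dfs_spec : Claim_equal_dfs := by
  intro n _ hpre
  exact dfs_eq_alt_aux n.toNat n (le_refl _) hpre
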